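-- pv_equiv track=rewrite | github.com/bour278/ergo-sums | collatz-automata/src/collatz_automata.py | collatz_t3
-- ===== SOURCE A (Python) =====
-- def collatz_t3(n):
--     if n <= 1:
--         return 1
--     if n % 2 == 1:
--         n = 3 * n + 1
--     while n % 2 == 0:
--         n //= 2
--     return n
-- ===== SOURCE B (Python) =====
-- def collatz_t3(n):
--     if n <= 1:
--         return 1
--     if n & 1:
--         n = 3 * n + 1
--     # n is now even and positive: n & -n is the largest power of 2 dividing n,
--     # so one exact division strips all factors of 2 at once.
--     return n // (n & -n)
-- ===== Notes on version B (the rewrite author's own statement) =====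
-- stated objective: idiomatic
-- what changed: The while loop that repeatedly halves n is replaced by a closed form: n // (n & -n) divides out all factors of 2 in one step using the lowest-set-bit trick.
import Mathlib
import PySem

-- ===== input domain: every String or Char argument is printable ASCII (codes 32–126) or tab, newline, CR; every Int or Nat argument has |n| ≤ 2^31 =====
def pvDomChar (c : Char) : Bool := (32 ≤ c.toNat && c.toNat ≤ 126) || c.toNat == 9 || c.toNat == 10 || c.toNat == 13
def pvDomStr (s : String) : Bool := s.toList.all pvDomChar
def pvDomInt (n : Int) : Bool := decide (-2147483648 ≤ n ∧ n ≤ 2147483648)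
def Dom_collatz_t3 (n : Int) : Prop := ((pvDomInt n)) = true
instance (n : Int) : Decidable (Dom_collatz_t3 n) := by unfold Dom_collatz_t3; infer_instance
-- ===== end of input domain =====

-- B replaces A's halving loop by the closed form n // (n & -n) (idiomatic lowest-set-bit trick).

-- ===== PORT A =====
-- A's while loop 'while n % 2 == 0: n //= 2'; the extra 'm ≠ 0' conjunct is a
-- totality guard only (the loop is entered only with positive even m, where it is vacuous).
def collatz_t3_strip (m : Int) : Int :=
  if _h : PySem.Int.mod m 2 = 0 ∧ m ≠ 0 then collatz_t3_strip (PySem.Int.floordiv m 2) else m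
  termination_by m.natAbs
  decreasing_by
    have h2 : PySem.Int.floordiv m 2 = Int.fdiv m 2 := rfl
    have h3 : m % 2 = 0 := by
      have := _h.1
      rw [PySem.Int.mod_eq_emod_of_pos (by norm_num)] at this
      omega
    rw [h2, Int.fdiv_eq_ediv]
    simp only [show (0:Int) ≤ 2 ∨ (2:Int) ∣ m ↔ True by simp, if_true]
    omega

def collatz_t3 (n : Int) : Int :=
  if n ≤ 1 then 1
  else
    collatz_t3_strip (if PySem.Int.mod n 2 = 1 then 3 * n + 1 else n)

-- ===== PORT B =====
-- Int.land is Python's '&' on ints (two's-complement bitwise and).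
def collatz_t3_alt (n : Int) : Int :=
  if n ≤ 1 then 1
  else
    let m := if Int.land n 1 ≠ 0 then 3 * n + 1 else n
    PySem.Int.floordiv m (Int.land m (-m))

-- ===== PRECONDITION & SPEC =====
def Spec_collatz_t3 (n : Int) (out : Int) : Prop := out = collatz_t3_alt n
instance (n : Int) (out : Int) : Decidable (Spec_collatz_t3 n out) := by unfold Spec_collatz_t3; infer_instance

-- ===== CLAIM (what is proved, stated in full; the proofs are below) =====
def Claim_equal_collatz_t3 : Prop := ∀ (n : Int), Dom_collatz_t3 n → Spec_collatz_t3 n (collatz_t3 n)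

-- ===== LEMMAS AND PROOFS =====

-- m & -m for a positive m, expressed over Nat: it is ldiff m (m-1) = m &&& ~(m-1).
theorem land_neg_ofNat (a : Nat) (h : 0 < a) :
    Int.land ((a : Int)) (-((a : Int))) = ((Nat.ldiff a (a - 1) : Nat) : Int) := by
  obtain ⟨b, rfl⟩ : ∃ b, a = b + 1 := ⟨a - 1, by omega⟩
  rfl

theorem ldiff_pred_of_odd (a : Nat) (h : a % 2 = 1) : Nat.ldiff a (a - 1) = 1 := by
  apply Nat.eq_of_testBit_eq
  intro k
  cases k with
  | zero =>
      rw [Nat.testBit_ldiff, Nat.testBit_zero, Nat.testBit_zero, Nat.testBit_zero]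
      have h1 : (a - 1) % 2 = 0 := by omega
      simp [h, h1]
  | succ k =>
      rw [Nat.testBit_ldiff, Nat.testBit_succ, Nat.testBit_succ, Nat.testBit_succ]
      have h1 : (a - 1) / 2 = a / 2 := by omega
      have h2 : (1 : Nat) / 2 = 0 := by norm_num
      rw [h1, h2, Nat.zero_testBit]
      simp

theorem ldiff_pred_of_even (b : Nat) (h : 0 < b) :
    Nat.ldiff (2 * b) (2 * b - 1) = 2 * Nat.ldiff b (b - 1) := by
  apply Nat.eq_of_testBit_eq
  intro k
  cases k with
  | zero =>
      rw [Nat.testBit_ldiff, Nat.testBit_zero, Nat.testBit_zero, Nat.testBit_zero]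
      have h1 : (2 * b) % 2 = 0 := by omega
      have h2 : (2 * Nat.ldiff b (b - 1)) % 2 = 0 := by omega
      simp [h1, h2]
  | succ k =>
      rw [Nat.testBit_ldiff, Nat.testBit_succ, Nat.testBit_succ, Nat.testBit_succ]
      have h1 : 2 * b / 2 = b := by omega
      have h2 : (2 * b - 1) / 2 = b - 1 := by omega
      have h3 : 2 * Nat.ldiff b (b - 1) / 2 = Nat.ldiff b (b - 1) := by omega
      rw [h1, h2, h3, Nat.testBit_ldiff]

-- Core: A's stripping loop equals one floor division by ldiff a (a-1), which is positive.
theorem strip_eq_fdiv (a : Nat) (h : 0 < a) :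
    0 < Nat.ldiff a (a - 1) ∧
      collatz_t3_strip ((a : Int)) =
        PySem.Int.floordiv ((a : Int)) (((Nat.ldiff a (a - 1) : Nat) : Int)) := by
  induction a using Nat.strong_induction_on with
  | _ a ih =>
    rcases Nat.even_or_odd a with ⟨b, hb⟩ | hodd
    · -- a = 2 * b even
      have hb' : a = 2 * b := by omega
      subst hb'
      have hbpos : 0 < b := by omega
      obtain ⟨hL, hS⟩ := ih b (by omega) hbpos
      rw [ldiff_pred_of_even b hbpos]
      constructor
      · omega
      · rw [collatz_t3_strip]
        have hmod : PySem.Int.mod (((2 * b : Nat) : Int)) 2 = 0 := by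
          rw [PySem.Int.mod_eq_emod_of_pos (by norm_num)]
          omega
        have hdiv : PySem.Int.floordiv (((2 * b : Nat) : Int)) 2 = (b : Int) := by
          rw [PySem.Int.floordiv_eq_ediv_of_pos (by norm_num)]
          omega
        rw [dif_pos ⟨hmod, by simp; omega⟩, hdiv, hS]
        rw [PySem.Int.floordiv_eq_ediv_of_pos (by exact_mod_cast hL),
            PySem.Int.floordiv_eq_ediv_of_pos (by push_cast; omega)]
        have e1 : (((2 * b : Nat) : Int)) = 2 * (b : Int) := by omega
        have e2 : (((2 * Nat.ldiff b (b - 1) : Nat) : Int)) = 2 * ((Nat.ldiff b (b - 1) : Nat) : Int) := by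
          omega
        rw [e1, e2, Int.mul_ediv_mul_of_pos _ _ (by norm_num)]
    · -- a odd
      have hmod1 : a % 2 = 1 := Nat.odd_iff.mp hodd
      rw [ldiff_pred_of_odd a hmod1]
      refine ⟨by omega, ?_⟩
      rw [collatz_t3_strip]
      have hmod : PySem.Int.mod ((a : Int)) 2 = 1 := by
        rw [PySem.Int.mod_eq_emod_of_pos (by norm_num)]
        omega
      rw [dif_neg (by rw [hmod]; simp)]
      rw [PySem.Int.floordiv_eq_ediv_of_pos (by norm_num)]
      simp

-- The parity tests agree on positive n: n % 2 == 1 iff n & 1 ≠ 0.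
theorem land_one_ofNat (a : Nat) : Int.land ((a : Int)) 1 = ((a % 2 : Nat) : Int) := by
  have : Int.ofNat (Nat.land a 1) = Int.ofNat (a % 2) := congrArg Int.ofNat (Nat.and_one_is_mod a)
  exact this

-- ===== VERDICT (by name: the statement is the Claim_ definition above) =====
theorem collatz_t3_spec : Claim_equal_collatz_t3 := by
  intro n _
  unfold Spec_collatz_t3 collatz_t3 collatz_t3_alt
  by_cases hle : n ≤ 1
  · simp [hle]
  · rw [if_neg hle, if_neg hle]
    obtain ⟨a, rfl⟩ : ∃ a : Nat, n = (a : Int) := ⟨n.toNat, by omega⟩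
    have ha : 1 < a := by omega
    have hmodcast : PySem.Int.mod ((a : Int)) 2 = ((a % 2 : Nat) : Int) := by
      rw [PySem.Int.mod_eq_emod_of_pos (by norm_num)]
      omega
    rcases Nat.even_or_odd a with ⟨b, hb⟩ | hodd
    · -- even: no 3n+1 step on either side
      have hm2 : a % 2 = 0 := by omega
      rw [hmodcast]
      rw [if_neg (by simp [hm2]), land_one_ofNat]
      simp only [hm2]
      rw [if_neg (by simp)]
      obtain ⟨_, hS⟩ := strip_eq_fdiv a (by omega)
      rw [hS, land_neg_ofNat a (by omega)]
    · -- odd: 3n+1 step on both sides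
      have hm2 : a % 2 = 1 := Nat.odd_iff.mp hodd
      rw [hmodcast]
      rw [if_pos (by simp [hm2]), land_one_ofNat]
      simp only [hm2]
      rw [if_pos (by simp)]
      have hcast : 3 * (a : Int) + 1 = ((3 * a + 1 : Nat) : Int) := by omega
      rw [hcast]
      obtain ⟨_, hS⟩ := strip_eq_fdiv (3 * a + 1) (by omega)
      rw [hS, land_neg_ofNat (3 * a + 1) (by omega)]
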